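-- pv_equiv track=rewrite | github.com/kibaster/python.homework | Solutions/task_1.py | pull
-- ===== SOURCE A (Python) =====
-- def pull(n:int):
--     four_stars = 0
--     five_stars = 0
--     c5 = 0
--     c4 = 0
--     skip = False
--     for i in range(1,n+1):
--         if skip:
--             skip = False
--             continue
--         c4+=1
--         c5+=1
--         if c4 == 10 and c5==90:
--                 five_stars+=1
--                 c5 =1
--                 four_stars+=1
--                 c4=0
--                 skip = True
--                 continue
--         if c5==90:
--             five_stars+=1
--             c5=0
--         if c4==10:
--             four_stars+=1
--             c4=0
--     return four_stars,five_stars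
-- ===== SOURCE B (Python) =====
-- def pull(n: int):
--     # closed form: five-star pity fires at every 90th pull; four-star pity fires
--     # every 10th pull, shifted by one after the combined event at pull 90
--     # (pull 91 is skipped), so it never coincides with a five-star again.
--     if n <= 0:
--         return 0, 0
--     five_stars = n // 90
--     four_stars = n // 10 if n <= 90 else (n - 1) // 10
--     return four_stars, five_stars
-- ===== Notes on version B (the rewrite author's own statement) =====
-- stated objective: faster
-- what changed: B replaces A's pull-by-pull simulation of the pity counters with a closed form: five-stars = n//90, four-stars = n//10 up to pull 90 and (n-1)//10 after (the combined event at pull 90 skips pull 91 and never recurs).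
import Mathlib
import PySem

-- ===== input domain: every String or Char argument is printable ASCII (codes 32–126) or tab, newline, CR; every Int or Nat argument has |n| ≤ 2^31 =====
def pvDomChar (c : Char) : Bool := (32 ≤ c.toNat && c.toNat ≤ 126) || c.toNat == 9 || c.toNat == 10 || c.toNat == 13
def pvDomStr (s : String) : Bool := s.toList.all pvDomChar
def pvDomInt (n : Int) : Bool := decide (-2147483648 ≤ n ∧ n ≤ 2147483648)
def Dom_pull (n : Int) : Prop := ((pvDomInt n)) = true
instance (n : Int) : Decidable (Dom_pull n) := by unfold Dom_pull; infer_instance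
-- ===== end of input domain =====

-- B replaces A's O(n) pull-by-pull pity simulation with an O(1) closed form
-- (five-star at every 90th pull; four-star every 10th, shifted by one past pull 91).

-- ===== PORT A =====
-- loop body of A; state = (four_stars, five_stars, c4, c5, skip); the index i is unused by the body
def pullStep (st : Int × Int × Int × Int × Bool) (_i : Int) : Int × Int × Int × Int × Bool :=
  match st with
  | (four, five, c4, c5, skip) =>
    if skip then (four, five, c4, c5, false)
    else
      let c4 := c4 + 1
      let c5 := c5 + 1
      if c4 == 10 && c5 == 90 then
        (four + 1, five + 1, 0, 1, true)
      else
        let p5 : Int × Int := if c5 == 90 then (five + 1, 0) else (five, c5)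
        let p4 : Int × Int := if c4 == 10 then (four + 1, 0) else (four, c4)
        (p4.1, p5.1, p4.2, p5.2, skip)

def pull (n : Int) : List Int :=
  let st := (PySem.List.pyRange 1 (n + 1) 1).foldl pullStep (0, 0, 0, 0, false)
  [st.1, st.2.1]

-- ===== PORT B =====
def pull_alt (n : Int) : List Int :=
  if n ≤ 0 then [0, 0]
  else
    let five := PySem.Int.floordiv n 90
    let four := if n ≤ 90 then PySem.Int.floordiv n 10 else PySem.Int.floordiv (n - 1) 10
    [four, five]

-- ===== PRECONDITION & SPEC =====
def Spec_pull (n : Int) (out : List Int) : Prop := out = pull_alt n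
instance (n : Int) (out : List Int) : Decidable (Spec_pull n out) := by unfold Spec_pull; infer_instance

-- ===== CLAIM (what is proved, stated in full; the proofs are below) =====
def Claim_equal_pull : Prop := ∀ (n : Int), Dom_pull n → Spec_pull n (pull n)

-- ===== LEMMAS AND PROOFS =====

-- closed-form description of A's loop state after k pulls
def stateSpec (k : Nat) : Int × Int × Int × Int × Bool :=
  if k ≤ 89 then ((k / 10 : Nat), 0, (k % 10 : Nat), (k : Nat), false)
  else if k = 90 then (9, 1, 0, 1, true)
  else (9 + ((k - 91) / 10 : Nat), (k / 90 : Nat), ((k - 91) % 10 : Nat), ((k - 90) % 90 : Nat), false)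

lemma foldl_pullStep_eq_iterate (l : List Int) (s : Int × Int × Int × Int × Bool) :
    l.foldl pullStep s = (fun t => pullStep t 0)^[l.length] s := by
  induction l generalizing s with
  | nil => rfl
  | cons x xs ih =>
      simp only [List.foldl_cons, List.length_cons, Function.iterate_succ_apply]
      exact ih _

lemma step_stateSpec (k : Nat) : pullStep (stateSpec k) 0 = stateSpec (k + 1) := by
  rcases Nat.lt_or_ge k 91 with h | h
  · interval_cases k <;> decide
  · have h89 : ¬ (k ≤ 89) := by omega
    have h90 : ¬ (k = 90) := by omega
    have h89' : ¬ (k + 1 ≤ 89) := by omega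
    have h90' : ¬ (k + 1 = 90) := by omega
    simp only [stateSpec, h89, h90, h89', h90', pullStep, Bool.false_eq_true,
      if_neg (by exact fun h => h)]
    simp only [Bool.and_eq_true, beq_iff_eq]
    split_ifs with h1 h2 h3 h4 <;>
      first
        | (exfalso; omega)
        | (simp only [Prod.mk.injEq]; refine ⟨?_, ?_, ?_, ?_, trivial⟩ <;> omega)

lemma iterate_stateSpec (k : Nat) :
    (fun t => pullStep t 0)^[k] (0, 0, 0, 0, false) = stateSpec k := by
  induction k with
  | zero => decide
  | succ k ih => rw [Function.iterate_succ_apply', ih]; exact step_stateSpec k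

lemma pull_eq_stateSpec (n : Int) :
    pull n = [(stateSpec n.toNat).1, (stateSpec n.toNat).2.1] := by
  unfold pull
  rw [foldl_pullStep_eq_iterate, PySem.List.length_pyRange_one]
  have : (n + 1 - 1).toNat = n.toNat := by omega
  rw [this, iterate_stateSpec]

-- ===== VERDICT (by name: the statement is the Claim_ definition above) =====
theorem pull_spec : Claim_equal_pull := by
  intro n _
  unfold Spec_pull pull_alt
  rw [pull_eq_stateSpec]
  by_cases hn : n ≤ 0
  · have : n.toNat = 0 := by omega
    simp [this, hn, stateSpec]
  · have hk : (n.toNat : Int) = n := by omega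
    have h10 : PySem.Int.floordiv n 10 = n / 10 := PySem.Int.floordiv_eq_ediv_of_pos (by norm_num)
    have h90 : PySem.Int.floordiv n 90 = n / 90 := PySem.Int.floordiv_eq_ediv_of_pos (by norm_num)
    have h10' : PySem.Int.floordiv (n - 1) 10 = (n - 1) / 10 :=
      PySem.Int.floordiv_eq_ediv_of_pos (by norm_num)
    have hnle : ¬ (n ≤ 0) := by omega
    unfold stateSpec
    simp only [h10, h90, h10']
    split_ifs with h1 h2 h3 h3' <;>
      simp only [List.cons.injEq, and_true] <;> omega
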